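-- pv_equiv track=rewrite | github.com/priyanshu-21singh/competitive-programming | codeforce contest/11 feb/moving chip.py | min_operations_to_move_chips
-- ===== SOURCE A (Python) =====
-- def min_operations_to_move_chips(n, chips):
--     last_chip_position = -1
--     operations = 0
--
--     for i, chip in enumerate(chips):
--         if chip == 1:
--             if last_chip_position != -1:
--                 operations += i - last_chip_position - 1
--             last_chip_position = i
--
--     return operations
-- ===== SOURCE B (Python) =====
-- def min_operations_to_move_chips(n, chips):
--     count = chips.count(1)
--     if count == 0:
--         return 0
--     first = chips.index(1)
--     last = len(chips) - 1 - chips[::-1].index(1)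
--     return last - first - (count - 1)
-- ===== Notes on version B (the rewrite author's own statement) =====
-- stated objective: simpler
-- what changed: Replaces the gap-accumulating loop over enumerate with a closed form: answer = last_index - first_index - (count-1) computed from count/index/reversed-index of 1s, 0 when no chip.
import Mathlib
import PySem

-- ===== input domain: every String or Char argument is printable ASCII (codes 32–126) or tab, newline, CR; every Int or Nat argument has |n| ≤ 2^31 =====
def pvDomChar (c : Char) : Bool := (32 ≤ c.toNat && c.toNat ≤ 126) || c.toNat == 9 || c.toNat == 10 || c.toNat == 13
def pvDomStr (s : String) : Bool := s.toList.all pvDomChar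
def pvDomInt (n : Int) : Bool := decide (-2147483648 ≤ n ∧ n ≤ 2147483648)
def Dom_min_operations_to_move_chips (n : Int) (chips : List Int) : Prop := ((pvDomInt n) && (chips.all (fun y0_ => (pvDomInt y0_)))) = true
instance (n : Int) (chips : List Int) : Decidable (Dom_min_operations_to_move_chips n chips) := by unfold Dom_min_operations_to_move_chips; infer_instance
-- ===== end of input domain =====

-- B replaces A's gap-accumulating loop by the closed form last - first - (count - 1)
-- over the positions of 1s (objective: simpler).

-- ===== PORT A =====
-- for i, chip in enumerate(chips): accumulate gaps; state = (last_chip_position, operations)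
def min_operations_to_move_chips (n : Int) (chips : List Int) : Int :=
  ((PySem.List.enumerate chips 0).foldl
    (fun (s : Int × Int) (p : Int × Int) =>
      if p.2 == 1 then
        (p.1, if s.1 != -1 then s.2 + p.1 - s.1 - 1 else s.2)
      else s) (-1, 0)).2

-- ===== PORT B =====
-- count = chips.count(1); first = chips.index(1); last = len(chips)-1-chips[::-1].index(1)
def min_operations_to_move_chips_alt (n : Int) (chips : List Int) : Int :=
  let count := PySem.List.count chips 1
  if count = 0 then 0
  else
    let first : Int := ((PySem.List.index? chips 1).getD 0 : Nat)
    let last : Int := (chips.length : Int) - 1 - (((PySem.List.index? chips.reverse 1).getD 0 : Nat) : Int)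
    last - first - ((count : Int) - 1)

-- ===== PRECONDITION & SPEC =====
def Spec_min_operations_to_move_chips (n : Int) (chips : List Int) (out : Int) : Prop := out = min_operations_to_move_chips_alt n chips
instance (n : Int) (chips : List Int) (out : Int) : Decidable (Spec_min_operations_to_move_chips n chips out) := by unfold Spec_min_operations_to_move_chips; infer_instance

-- ===== CLAIM (what is proved, stated in full; the proofs are below) =====
def Claim_equal_min_operations_to_move_chips : Prop := ∀ (n : Int) (chips : List Int), Dom_min_operations_to_move_chips n chips → Spec_min_operations_to_move_chips n chips (min_operations_to_move_chips n chips)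

-- ===== LEMMAS AND PROOFS =====

/-- index (from the front) of the LAST occurrence of 1, if any. -/
def lastPos : List Int → Option Nat
  | [] => none
  | c :: r =>
    match lastPos r with
    | some k => some (k + 1)
    | none => if c = 1 then some 0 else none

lemma lastPos_none_iff (l : List Int) : lastPos l = none ↔ l.count 1 = 0 := by
  induction l with
  | nil => simp [lastPos]
  | cons c r ih =>
    cases h : lastPos r with
    | some k =>
      have hcnt : r.count 1 ≠ 0 := fun h0 => by simp [ih.2 h0] at h
      simp [lastPos, h, List.count_cons]
      omega
    | none =>
      by_cases hc : c = 1 <;>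
        simp_all [lastPos, List.count_cons, eq_comm]

/-- A's loop body, named for the lemmas. -/
abbrev stepA : Int × Int → Int × Int → Int × Int :=
  fun s p =>
    if p.2 == 1 then
      (p.1, if s.1 != -1 then s.2 + p.1 - s.1 - 1 else s.2)
    else s

lemma loop_seen (l : List Int) : ∀ (s j ops : Int), 0 ≤ s → 0 ≤ j →
    (PySem.List.enumerate l s).foldl stepA (j, ops) =
      (match lastPos l with
       | none => (j, ops)
       | some k => ((s + k : Int), ops + (s + k) - j - (l.count 1 : Int))) := by
  induction l with
  | nil => intro s j ops _ _; simp [PySem.List.enumerate_nil, lastPos]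
  | cons c r ih =>
    intro s j ops hs hj
    rw [PySem.List.enumerate_cons, List.foldl_cons]
    by_cases hc : c = 1
    · subst hc
      have hj' : (j != -1) = true := by simp; omega
      simp only [stepA, beq_self_eq_true, if_true, hj']
      rw [ih (s + 1) s (ops + s - j - 1) (by omega) hs]
      cases h : lastPos r with
      | none =>
        have h0 : r.count 1 = 0 := (lastPos_none_iff r).1 h
        simp [lastPos, h, List.count_cons, h0, Prod.mk.injEq]
        all_goals (push_cast; omega)
      | some k =>
        simp [lastPos, h, List.count_cons, Prod.mk.injEq]
        all_goals (push_cast; omega)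
    · have hc' : (c == 1) = false := by simp [hc]
      simp only [stepA, hc', Bool.false_eq_true, if_false]
      rw [ih (s + 1) j ops (by omega) hj]
      cases h : lastPos r with
      | none => simp [lastPos, h, hc]
      | some k =>
        simp [lastPos, h, List.count_cons, hc, hc', Prod.mk.injEq]
        all_goals (push_cast; omega)

lemma loop_unseen (l : List Int) : ∀ (s : Int), 0 ≤ s →
    (PySem.List.enumerate l s).foldl stepA (-1, 0) =
      (match lastPos l with
       | none => (-1, 0)
       | some k => ((s + k : Int),
           (k : Int) - (((PySem.List.index? l 1).getD 0 : Nat) : Int) - ((l.count 1 : Int) - 1))) := by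
  induction l with
  | nil => intro s _; simp [PySem.List.enumerate_nil, lastPos]
  | cons c r ih =>
    intro s hs
    rw [PySem.List.enumerate_cons, List.foldl_cons]
    by_cases hc : c = 1
    · subst hc
      simp only [stepA, beq_self_eq_true, if_true]
      norm_num
      rw [loop_seen r (s + 1) s 0 (by omega) hs]
      cases h : lastPos r with
      | none =>
        have h0 : r.count 1 = 0 := (lastPos_none_iff r).1 h
        simp [lastPos, h, h0, PySem.List.index?_cons_self]
      | some k =>
        simp [lastPos, h, List.count_cons, PySem.List.index?_cons_self, Prod.mk.injEq]
        all_goals (push_cast; omega)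
    · have hc' : (c == 1) = false := by simp [hc]
      simp only [stepA, hc', Bool.false_eq_true, if_false]
      rw [ih (s + 1) (by omega)]
      cases h : lastPos r with
      | none => simp [lastPos, h, hc]
      | some k =>
        have hmem : (1 : Int) ∈ r := by
          by_contra hnot
          have := (lastPos_none_iff r).2 (by simp [List.count_eq_zero, hnot])
          simp [this] at h
        obtain ⟨f, hf⟩ := Option.isSome_iff_exists.mp ((PySem.List.index?_isSome_iff r 1).2 hmem)
        have hne : c ≠ 1 := hc
        have hidx : PySem.List.index? (c :: r) 1 = some (f + 1) := by
          rw [PySem.List.index?_cons_of_ne r hne, hf]; rfl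
        simp only [lastPos, h, hidx, hf, Option.getD_some, List.count_cons, hc',
          Bool.false_eq_true, if_false, Prod.mk.injEq]
        all_goals (push_cast; omega)

/-- first index of 1 in the reverse locates the last 1. -/
lemma lastPos_reverse (l : List Int) : ∀ (k : Nat), lastPos l = some k →
    ∃ g : Nat, PySem.List.index? l.reverse 1 = some g ∧ (k : Int) = (l.length : Int) - 1 - g := by
  induction l with
  | nil => intro k h; simp [lastPos] at h
  | cons c r ih =>
    intro k h
    cases hr : lastPos r with
    | some m =>
      obtain ⟨g, hg, hkg⟩ := ih m hr
      have hmem : (1 : Int) ∈ r.reverse := by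
        rw [← PySem.List.index?_isSome_iff r.reverse 1, hg]; simp
      obtain ⟨hlt, -⟩ := PySem.List.getElem_of_index?_eq_some hg
      have hlt' : g < r.length := by simpa using hlt
      simp only [lastPos, hr, Option.some.injEq] at h
      subst h
      refine ⟨g, ?_, ?_⟩
      · rw [List.reverse_cons, PySem.List.index?_append_of_mem [c] hmem]; exact hg
      · simp only [List.length_cons]
        push_cast at hkg ⊢
        omega
    | none =>
      simp only [lastPos, hr] at h
      by_cases hc : c = 1
      · subst hc
        simp at h
        subst h
        have hnot : (1 : Int) ∉ r.reverse := by
          intro hm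
          have : r.count 1 ≠ 0 := by
            simp [List.count_eq_zero]; exact List.mem_reverse.mp hm
          exact this ((lastPos_none_iff r).1 hr)
        refine ⟨r.reverse.length, ?_, ?_⟩
        · rw [List.reverse_cons]; exact PySem.List.index?_append_singleton_self r.reverse 1 hnot
        · simp
      · simp [hc] at h

theorem min_operations_to_move_chips_spec : Claim_equal_min_operations_to_move_chips := by
  intro n chips _
  unfold Spec_min_operations_to_move_chips min_operations_to_move_chips min_operations_to_move_chips_alt
  rw [show (fun (s : Int × Int) (p : Int × Int) =>
      if p.2 == 1 then (p.1, if s.1 != -1 then s.2 + p.1 - s.1 - 1 else s.2) else s) = stepA from rfl]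
  rw [loop_unseen chips 0 le_rfl]
  rw [PySem.List.count_eq]
  cases h : lastPos chips with
  | none =>
    have h0 : chips.count 1 = 0 := (lastPos_none_iff chips).1 h
    simp [h0]
  | some k =>
    have h0 : chips.count 1 ≠ 0 := by
      intro h0; rw [← lastPos_none_iff] at h0; simp [h0] at h
    obtain ⟨g, hg, hkg⟩ := lastPos_reverse chips k h
    simp only [if_neg h0, hg, Option.getD_some, hkg]
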